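-- pv_equiv track=rewrite | github.com/sneefyyy/DSL | generators/repeat_pattern_generator.py | repeat_diagonal
-- ===== SOURCE A (Python) =====
-- def repeat_diagonal(grid, times):
--     """
--     Repeat the pattern diagonally.
--     """
--     if not grid or not grid[0]:
--         return grid
--
--     rows = len(grid)
--     cols = len(grid[0])
--
--     # Find the first non-zero cell
--     pattern_value = 0
--     start_row, start_col = 0, 0
--     for row in range(rows):
--         for col in range(cols):
--             if grid[row][col] != 0:
--                 pattern_value = grid[row][col]
--                 start_row, start_col = row, col
--                 break
--         if pattern_value != 0:
--             break
--
--     if pattern_value == 0: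
--         return grid
--
--     # Create new grid
--     new_grid = [[0 for _ in range(cols)] for _ in range(rows)]
--
--     # Place pattern diagonally
--     for rep in range(times):
--         new_row = start_row + rep
--         new_col = start_col + rep
--         if new_row < rows and new_col < cols:
--             new_grid[new_row][new_col] = pattern_value
--
--     return new_grid
-- ===== SOURCE B (Python) =====
-- def repeat_diagonal(grid, times):
--     """
--     Repeat the pattern diagonally.
--     """
--     if not grid or not grid[0]:
--         return grid
--     rows, cols = len(grid), len(grid[0])
--     # first non-zero cell of the rows x cols scan area
--     found = next(((r, c, v) for r, row in enumerate(grid)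
--                   for c, v in enumerate(row[:cols]) if v != 0), None)
--     if found is None:
--         return grid
--     sr, sc, val = found
--     return [[val if (r - sr == c - sc and 0 <= r - sr < times) else 0
--              for c in range(cols)]
--             for r in range(rows)]
-- ===== Notes on version B (the rewrite author's own statement) =====
-- stated objective: alternative
-- what changed: B replaces A's zero-initialised grid plus scatter loop over rep in range(times) with a single nested comprehension deciding each cell from a diagonal predicate, and finds the first non-zero cell by enumerating row slices instead of double-indexing range(rows) x range(cols).
import Mathlib
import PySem

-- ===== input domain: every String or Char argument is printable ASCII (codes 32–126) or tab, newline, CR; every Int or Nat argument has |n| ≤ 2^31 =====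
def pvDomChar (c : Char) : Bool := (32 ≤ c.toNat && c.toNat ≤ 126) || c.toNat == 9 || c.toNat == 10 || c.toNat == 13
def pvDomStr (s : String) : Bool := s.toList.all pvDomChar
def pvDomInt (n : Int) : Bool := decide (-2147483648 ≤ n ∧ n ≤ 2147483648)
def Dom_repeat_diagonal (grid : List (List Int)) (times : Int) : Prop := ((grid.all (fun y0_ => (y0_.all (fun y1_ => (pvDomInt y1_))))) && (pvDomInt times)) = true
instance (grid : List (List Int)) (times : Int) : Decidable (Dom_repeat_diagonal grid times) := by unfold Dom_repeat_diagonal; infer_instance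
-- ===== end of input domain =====

-- ===== PORT A =====
-- B replaces A's zero-grid-then-scatter diagonal loop by a direct per-cell comprehension (alternative decomposition).
-- helpers for A: 2-d read with Python's defaulting only used in-range, and 2-d write new_grid[i][j] = v
def pvGet2 (grid : List (List Int)) (r c : Nat) : Int := (grid.getD r []).getD c 0

def pvSet2 (g : List (List Int)) (i j : Nat) (v : Int) : List (List Int) :=
  g.set i ((g.getD i []).set j v)

-- A's double loop with break: first (row, col) in row-major order (col < cols) with a non-zero cell
def pvAFind (grid : List (List Int)) (rows cols : Nat) : Option (Nat × Nat) :=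
  (List.range rows).findSome? (fun r =>
    ((List.range cols).find? (fun c => pvGet2 grid r c != 0)).map (fun c => (r, c)))

def repeat_diagonal (grid : List (List Int)) (times : Int) : List (List Int) :=
  if grid = [] ∨ grid.headD [] = [] then grid
  else
    let rows := grid.length
    let cols := (grid.headD []).length
    match pvAFind grid rows cols with
    | none => grid
    | some (sr, sc) =>
      let v := pvGet2 grid sr sc
      let init := (List.range rows).map (fun _ => (List.range cols).map (fun _ => (0 : Int)))
      (PySem.List.pyRange 0 times 1).foldl (fun g rep =>
        if (sr : Int) + rep < (rows : Int) ∧ (sc : Int) + rep < (cols : Int) then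
          pvSet2 g ((sr : Int) + rep).toNat ((sc : Int) + rep).toNat v
        else g) init

-- ===== PORT B =====
-- first non-zero cell of a row, enumerating the row itself (B's `enumerate(row[:cols])`, with `take` for the slice)
def pvRowNZ (row : List Int) (c : Nat) : Option (Nat × Int) :=
  match row with
  | [] => none
  | x :: rest => if x ≠ 0 then some (c, x) else pvRowNZ rest (c + 1)

def pvFindNZ (gs : List (List Int)) (cols : Nat) (r : Nat) : Option (Nat × Nat × Int) :=
  match gs with
  | [] => none
  | row :: rest =>
    match pvRowNZ (row.take cols) 0 with
    | some (c, v) => some (r, c, v)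
    | none => pvFindNZ rest cols (r + 1)

def repeat_diagonal_alt (grid : List (List Int)) (times : Int) : List (List Int) :=
  if grid = [] ∨ grid.headD [] = [] then grid
  else
    let rows := grid.length
    let cols := (grid.headD []).length
    match pvFindNZ grid cols 0 with
    | none => grid
    | some (sr, sc, v) =>
      (List.range rows).map (fun (r : Nat) => (List.range cols).map (fun (c : Nat) =>
        if (r : Int) - sr = (c : Int) - sc ∧ 0 ≤ (r : Int) - sr ∧ (r : Int) - sr < times
        then v else 0))

-- ===== PRECONDITION & SPEC =====
-- Pre_ excludes exactly the inputs on which A raises IndexError: a row shorter than len(grid[0])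
-- that the scan reaches while every previously scanned cell (and the short row itself) is zero.
def Pre_repeat_diagonal (grid : List (List Int)) (times : Int) : Prop :=
  ∀ i < grid.length, (grid.getD i []).length < (grid.headD []).length →
    ∃ k ≤ i, ∃ c < (grid.headD []).length,
      c < (grid.getD k []).length ∧ (grid.getD k []).getD c 0 ≠ 0
instance (grid : List (List Int)) (times : Int) : Decidable (Pre_repeat_diagonal grid times) := by
  unfold Pre_repeat_diagonal; infer_instance

def pvWitness_repeat_diagonal : List (List Int) × Int := ([[0, 1], [0, 0]], 2)

def Spec_repeat_diagonal (grid : List (List Int)) (times : Int) (out : List (List Int)) : Prop := out = repeat_diagonal_alt grid times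
instance (grid : List (List Int)) (times : Int) (out : List (List Int)) : Decidable (Spec_repeat_diagonal grid times out) := by unfold Spec_repeat_diagonal; infer_instance

-- ===== CLAIM (what is proved, stated in full; the proofs are below) =====
def Claim_equal_repeat_diagonal : Prop := ∀ (grid : List (List Int)) (times : Int), Dom_repeat_diagonal grid times → Pre_repeat_diagonal grid times → Spec_repeat_diagonal grid times (repeat_diagonal grid times)

-- ===== LEMMAS AND PROOFS =====

-- B's bounded row scan, with the values it carries, against A's loop over range(cols)
theorem rowfind_eq (row : List Int) (cols k : Nat) :
    pvRowNZ (row.take cols) k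
      = ((List.range cols).find? (fun c => row.getD c 0 != 0)).map
          (fun c => (k + c, row.getD c 0)) := by
  induction row generalizing cols k with
  | nil =>
    rw [List.take_nil, List.find?_eq_none.mpr (by simp)]
    rfl
  | cons x rest ih =>
    cases cols with
    | zero => rfl
    | succ cols =>
      rw [List.take_succ_cons, List.range_succ_eq_map, List.find?_cons]
      by_cases hx : x = 0
      · have hb : ((x :: rest).getD 0 0 != 0) = false := by simp [hx]
        rw [hb]
        have hp : pvRowNZ (x :: rest.take cols) k = pvRowNZ (rest.take cols) (k + 1) := by
          simp [pvRowNZ, hx]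
        rw [hp, ih cols (k + 1), List.find?_map]
        have hpred : ((fun c => (x :: rest).getD c 0 != 0) ∘ Nat.succ)
            = fun c => rest.getD c 0 != 0 := by
          funext c; rfl
        rw [hpred, Option.map_map]
        cases List.find? (fun c => rest.getD c 0 != 0) (List.range cols) with
        | none => rfl
        | some c => simp; omega
      · have hb : ((x :: rest).getD 0 0 != 0) = true := by simp [hx]
        rw [hb]
        simp [pvRowNZ, hx]

-- pulling an Option.map out of a findSome? (no library lemma closes this)
theorem optionMap_findSome? {α β γ : Type} (f : α → Option β) (g : β → γ) (l : List α) :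
    List.findSome? (fun a => Option.map g (f a)) l = Option.map g (List.findSome? f l) := by
  induction l with
  | nil => simp
  | cons a l ih =>
    rw [List.findSome?_cons, List.findSome?_cons]
    cases f a <;> simp [ih]

-- the two first-non-zero searches agree (on any grid shape)
theorem find_eq (cols : Nat) (gs : List (List Int)) (k : Nat) :
    pvFindNZ gs cols k
      = (pvAFind gs gs.length cols).map (fun p => (k + p.1, p.2, pvGet2 gs p.1 p.2)) := by
  induction gs generalizing k with
  | nil => simp [pvFindNZ, pvAFind]
  | cons g rest ih =>
    rw [pvFindNZ, pvAFind, List.length_cons, List.range_succ_eq_map, List.findSome?_cons]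
    have hpred : (fun c => pvGet2 (g :: rest) 0 c != 0) = (fun c => g.getD c 0 != 0) := by
      funext c; simp [pvGet2]
    rw [hpred, rowfind_eq g cols 0]
    cases hfi : List.find? (fun c => g.getD c 0 != 0) (List.range cols) with
    | some c =>
      simp only [hfi, Option.map_some]
      simp [pvGet2]
    | none =>
      simp only [hfi, Option.map_none]
      rw [List.findSome?_map, ih (k + 1)]
      have hcomp : ((fun r => ((List.range cols).find? fun c => pvGet2 (g :: rest) r c != 0).map
              (fun c => (r, c))) ∘ Nat.succ)
          = fun r => Option.map (fun p : Nat × Nat => (p.1 + 1, p.2))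
              (((List.range cols).find? fun c => pvGet2 rest r c != 0).map (fun c => (r, c))) := by
        funext r
        have : (fun c => pvGet2 (g :: rest) (Nat.succ r) c != 0)
            = (fun c => pvGet2 rest r c != 0) := by
          funext c; simp [pvGet2]
        simp only [Function.comp, this, Option.map_map]
        rfl
      rw [hcomp, optionMap_findSome?]
      have hA : List.findSome? (fun r => Option.map (fun c => (r, c))
            (List.find? (fun c => pvGet2 rest r c != 0) (List.range cols)))
            (List.range rest.length) = pvAFind rest rest.length cols := rfl
      rw [hA]
      cases pvAFind rest rest.length cols with
      | none => rfl
      | some p =>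
        obtain ⟨a, b⟩ := p
        simp [pvGet2]
        omega

-- scatter fold over range(n) equals the per-cell formula (natural-number count)
theorem fold_eq_map (sr sc : Nat) (v : Int) (rows cols : Nat) (n : Nat) :
    (PySem.List.pyRange 0 (n : Int) 1).foldl (fun g rep =>
        if (sr : Int) + rep < (rows : Int) ∧ (sc : Int) + rep < (cols : Int) then
          pvSet2 g ((sr : Int) + rep).toNat ((sc : Int) + rep).toNat v
        else g)
      ((List.range rows).map (fun _ => (List.range cols).map (fun _ => (0 : Int))))
    = (List.range rows).map (fun (r : Nat) => (List.range cols).map (fun (c : Nat) =>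
        if (r : Int) - sr = (c : Int) - sc ∧ 0 ≤ (r : Int) - sr ∧ (r : Int) - sr < (n : Int)
        then v else 0)) := by
  induction n with
  | zero =>
    rw [show PySem.List.pyRange 0 ((0 : Nat) : Int) 1 = [] from rfl, List.foldl_nil]
    refine (List.map_congr_left ?_).symm
    intro r _
    refine List.map_congr_left ?_
    intro c _
    rw [if_neg]
    rintro ⟨-, h2, h3⟩
    omega
  | succ n ih =>
    rw [PySem.List.pyRange_zero_natCast, List.range_succ, List.map_append, List.foldl_append,
      ← PySem.List.pyRange_zero_natCast, ih]
    simp only [List.map_cons, List.map_nil, List.foldl_cons, List.foldl_nil]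
    by_cases hin : (sr : Int) + (n : Int) < (rows : Int) ∧ (sc : Int) + (n : Int) < (cols : Int)
    · rw [if_pos hin]
      have hi : ((sr : Int) + (n : Int)).toNat = sr + n := by omega
      have hj : ((sc : Int) + (n : Int)).toNat = sc + n := by omega
      have hr : sr + n < rows := by omega
      have hc : sc + n < cols := by omega
      rw [hi, hj]
      unfold pvSet2
      apply List.ext_getElem
      · simp
      · intro r h1 h2
        have hrr : r < rows := by simpa using h2
        rw [List.getElem_set]
        by_cases he : sr + n = r
        · rw [if_pos he]
          subst he
          rw [List.getD_eq_getElem _ _ (by simpa using hr), List.getElem_map, List.getElem_range,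
            List.getElem_map, List.getElem_range]
          apply List.ext_getElem
          · simp
          · intro c hc1 hc2
            have hcc : c < cols := by simpa using hc2
            rw [List.getElem_set, List.getElem_map, List.getElem_range,
              List.getElem_map, List.getElem_range]
            split_ifs <;> first | rfl | (push_cast at *; omega)
        · rw [if_neg he, List.getElem_map, List.getElem_range, List.getElem_map, List.getElem_range]
          refine List.map_congr_left ?_
          intro c _
          split_ifs <;> first | rfl | (push_cast at *; omega)
    · rw [if_neg hin]
      refine List.map_congr_left ?_
      intro r hr
      refine List.map_congr_left ?_
      intro c hc
      rw [List.mem_range] at hr hc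
      by_cases hcnd : (r : Int) - sr = (c : Int) - sc ∧ 0 ≤ (r : Int) - sr ∧ (r : Int) - sr < (n : Int)
      · rw [if_pos hcnd, if_pos ⟨hcnd.1, hcnd.2.1, by push_cast; omega⟩]
      · rw [if_neg hcnd, if_neg]
        rintro ⟨g1, g2, g3⟩
        push_cast at g3
        refine hcnd ⟨g1, g2, ?_⟩
        omega
  
-- the same for an arbitrary integer times (times ≤ 0 gives the all-zero grid on both sides)
theorem fold_eq_map_int (sr sc : Nat) (v : Int) (rows cols : Nat) (t : Int) :
    (PySem.List.pyRange 0 t 1).foldl (fun g rep =>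
        if (sr : Int) + rep < (rows : Int) ∧ (sc : Int) + rep < (cols : Int) then
          pvSet2 g ((sr : Int) + rep).toNat ((sc : Int) + rep).toNat v
        else g)
      ((List.range rows).map (fun _ => (List.range cols).map (fun _ => (0 : Int))))
    = (List.range rows).map (fun (r : Nat) => (List.range cols).map (fun (c : Nat) =>
        if (r : Int) - sr = (c : Int) - sc ∧ 0 ≤ (r : Int) - sr ∧ (r : Int) - sr < t
        then v else 0)) := by
  by_cases ht : 0 ≤ t
  · obtain ⟨n, rfl⟩ : ∃ n : Nat, t = (n : Int) := ⟨t.toNat, (Int.toNat_of_nonneg ht).symm⟩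
    exact fold_eq_map sr sc v rows cols n
  · have hempty : PySem.List.pyRange 0 t 1 = [] := by
      simp [PySem.List.pyRange, show ¬ 0 < t from by omega]
    rw [hempty, List.foldl_nil]
    refine (List.map_congr_left ?_).symm
    intro r _
    refine List.map_congr_left ?_
    intro c _
    rw [if_neg]
    rintro ⟨-, h2, h3⟩
    omega

-- ===== VERDICT (by name: the statement is the Claim_ definition above) =====
theorem repeat_diagonal_spec : Claim_equal_repeat_diagonal := by
  intro grid times _hdom _hpre
  unfold Spec_repeat_diagonal
  by_cases h : grid = [] ∨ grid.headD [] = []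
  · unfold repeat_diagonal repeat_diagonal_alt
    rw [if_pos h, if_pos h]
  · have hfind := find_eq (grid.headD []).length grid 0
    cases hA : pvAFind grid grid.length (grid.headD []).length with
    | none =>
      rw [hA, Option.map_none] at hfind
      unfold repeat_diagonal repeat_diagonal_alt
      rw [if_neg h, if_neg h]
      dsimp only
      rw [hA, hfind]
    | some p =>
      obtain ⟨sr, sc⟩ := p
      rw [hA, Option.map_some] at hfind
      simp only [Nat.zero_add] at hfind
      unfold repeat_diagonal repeat_diagonal_alt
      rw [if_neg h, if_neg h]
      dsimp only
      rw [hA, hfind]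
      exact fold_eq_map_int sr sc (pvGet2 grid sr sc) grid.length (grid.headD []).length times
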